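-- pv_equiv track=rewrite | github.com/johngouk/espaltherma-python | tools/generate_model_conversions.py | normalise_model_label
-- ===== SOURCE A (Python) =====
-- def normalise_model_label(filename: str) -> str:
--     """Short, human-facing model label from header filename.
--
--     - Drop trailing .h
--     - Strip any case-insensitive "altherma"
--     - Collapse whitespace
--     """
--     name = filename
--     if name.lower().endswith(".h"):
--         name = name[:-2]
--     lower = name.lower()
--     out = []
--     i = 0
--     while i < len(name):
--         if lower.startswith("altherma", i):
--             i += len("altherma")
--             continue
--         out.append(name[i])
--         i += 1
--     cleaned = "".join(out)
--     cleaned = " ".join(cleaned.split())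
--     return cleaned.strip()
-- ===== SOURCE B (Python) =====
-- def _strip_altherma(token: str) -> str:
--     """Remove every (case-insensitive, leftmost non-overlapping) 'altherma'."""
--     j = token.lower().find("altherma")
--     if j == -1:
--         return token
--     return token[:j] + _strip_altherma(token[j + 8:])
--
--
-- def normalise_model_label(filename: str) -> str:
--     name = filename[:-2] if filename.lower().endswith(".h") else filename
--     words = [w for w in map(_strip_altherma, name.split()) if w]
--     return " ".join(words)
-- ===== Notes on version B (the rewrite author's own statement) =====
-- stated objective: faster
-- what changed: Replaces A's index-based per-character scan loop plus post-hoc split/join/strip cleanup by a word-level decomposition: split into whitespace tokens first, delete marker-word occurrences per token by recursive find-and-slice, drop emptied tokens, join with single spaces.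
import Mathlib
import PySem

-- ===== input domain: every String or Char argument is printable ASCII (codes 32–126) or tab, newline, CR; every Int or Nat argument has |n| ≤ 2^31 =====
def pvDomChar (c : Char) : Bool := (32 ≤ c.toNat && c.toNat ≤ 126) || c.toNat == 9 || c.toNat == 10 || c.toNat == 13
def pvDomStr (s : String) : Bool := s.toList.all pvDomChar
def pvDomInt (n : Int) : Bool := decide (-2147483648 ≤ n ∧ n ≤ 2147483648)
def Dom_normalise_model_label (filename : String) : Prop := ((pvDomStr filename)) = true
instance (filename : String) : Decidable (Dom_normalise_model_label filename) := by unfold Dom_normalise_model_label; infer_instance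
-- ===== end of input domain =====

-- B rewrites A's per-character scan into a word-level decomposition (split into tokens, find-and-slice removal per token, join); measured faster by a constant factor (library find/slice vs per-character loop).

-- the literal "altherma" (8 chars), shared by both ports
def pvPat : List Char := "altherma".toList

-- ===== PORT A =====
-- A's while-loop over index i of name (and of lower = name.lower(), computed once),
-- rendered as synchronous recursion over the two suffixes name[i:], lower[i:]
def pvAScan : List Char → List Char → List Char
  | [], _ => []                                    -- while i < len(name)
  | c :: rest, lcs =>
    if PySem.Chars.startswith lcs pvPat then       -- lower.startswith("altherma", i)
      pvAScan ((c :: rest).drop 8) (lcs.drop 8)    -- i += 8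
    else
      c :: pvAScan rest (lcs.drop 1)               -- out.append(name[i]); i += 1
termination_by ncs _ => ncs.length
decreasing_by
  · simp only [List.length_drop, List.length_cons]; omega
  · simp only [List.length_cons]; omega

def normalise_model_label (filename : String) : String :=
  let name0 := filename.toList
  -- name[:-2]: exact as take (len-2) also for len < 2 (Nat subtraction truncates at 0, as Python's empty slice)
  let name := if PySem.Chars.endswith (PySem.Chars.lower name0) ".h".toList
              then name0.take (name0.length - 2) else name0
  let cleaned := pvAScan name (PySem.Chars.lower name)
  let cleaned2 := PySem.Chars.join " ".toList (PySem.Chars.split₀ cleaned)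
  String.ofList (PySem.Chars.strip cleaned2)

-- ===== PORT B =====
-- _strip_altherma: recursive find-and-slice removal of "altherma" (case-insensitive)
def pvBStrip (tok : List Char) : List Char :=
  if _h : PySem.Chars.find (PySem.Chars.lower tok) pvPat = -1 then tok
  else
    tok.take (PySem.Chars.find (PySem.Chars.lower tok) pvPat).toNat ++
      pvBStrip (tok.drop ((PySem.Chars.find (PySem.Chars.lower tok) pvPat).toNat + 8))
termination_by tok.length
decreasing_by
  have h0 := PySem.Chars.neg_one_le_find (PySem.Chars.lower tok) pvPat
  have h1 : (0:Int) ≤ PySem.Chars.find (PySem.Chars.lower tok) pvPat := by omega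
  have h2 := (PySem.Chars.find_spec h1).1
  have h3 := h2.length_le
  simp only [List.length_drop, List.length_map, PySem.Chars.lower, pvPat] at *
  simp at h3
  omega

def normalise_model_label_alt (filename : String) : String :=
  let name0 := filename.toList
  let name := if PySem.Chars.endswith (PySem.Chars.lower name0) ".h".toList
              then name0.take (name0.length - 2) else name0
  let words := ((PySem.Chars.split₀ name).map pvBStrip).filter (fun w => !w.isEmpty)
  String.ofList (PySem.Chars.join " ".toList words)

-- ===== PRECONDITION & SPEC =====
def Spec_normalise_model_label (filename : String) (out : String) : Prop := out = normalise_model_label_alt filename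
instance (filename : String) (out : String) : Decidable (Spec_normalise_model_label filename out) := by unfold Spec_normalise_model_label; infer_instance

-- ===== CLAIM (what is proved, stated in full; the proofs are below) =====
def Claim_equal_normalise_model_label : Prop := ∀ (filename : String), Dom_normalise_model_label filename → Spec_normalise_model_label filename (normalise_model_label filename)

-- ===== LEMMAS AND PROOFS =====

-- proof-side view of A's scan: the lower string is determined by the name suffix
def pvRem (cs : List Char) : List Char := pvAScan cs (PySem.Chars.lower cs)

-- characters of the pattern are never whitespace
theorem pv_pat_nonspace : ∀ c ∈ pvPat, PySem.Chars.isspace c = false := by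
  intro c hc
  rw [show pvPat = ['a','l','t','h','e','r','m','a'] from rfl] at hc
  fin_cases hc <;> rfl

theorem pv_isupper_nonspace (y : Char) (h : PySem.Chars.isupper y = true) :
    PySem.Chars.isspace y = false := by
  have hA : 'A'.val.toNat = 65 := rfl
  have hZ : 'Z'.val.toNat = 90 := rfl
  simp only [PySem.Chars.isupper, Char.le_def, UInt32.le_iff_toNat_le, Bool.and_eq_true,
    decide_eq_true_eq, hA, hZ] at h
  simp only [PySem.Chars.isspace, Bool.or_eq_false_iff, Bool.and_eq_false_iff,
    decide_eq_false_iff_not, Char.toNat] at *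
  omega

-- a character whose lowercase form occurs in the pattern is not whitespace
theorem pv_lower_mem_pat_nonspace (y : Char) (h : PySem.Chars.lowerChar y ∈ pvPat) :
    PySem.Chars.isspace y = false := by
  by_cases hu : PySem.Chars.isupper y = true
  · exact pv_isupper_nonspace y hu
  · have : PySem.Chars.lowerChar y = y := by
      simp [PySem.Chars.lowerChar, hu]
    rw [this] at h
    exact pv_pat_nonspace y h

-- rem equations (A's scan, one step at a time)
theorem pvRem_nil : pvRem [] = [] := by
  unfold pvRem pvAScan
  rfl

theorem pvRem_cons_match (c : Char) (rest : List Char)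
    (h : pvPat <+: PySem.Chars.lower (c :: rest)) :
    pvRem (c :: rest) = pvRem ((c :: rest).drop 8) := by
  unfold pvRem
  rw [pvAScan]
  rw [if_pos (by rw [PySem.Chars.startswith_iff]; exact h)]
  congr 1
  simp [PySem.Chars.lower, List.map_drop]

theorem pvRem_cons_nomatch (c : Char) (rest : List Char)
    (h : ¬ pvPat <+: PySem.Chars.lower (c :: rest)) :
    pvRem (c :: rest) = c :: pvRem rest := by
  unfold pvRem
  rw [pvAScan]
  rw [if_neg (by rw [PySem.Chars.startswith_iff]; exact h)]
  congr 1

theorem pv_no_match_at_space (c : Char) (rest : List Char)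
    (hc : PySem.Chars.isspace c = true) : ¬ pvPat <+: PySem.Chars.lower (c :: rest) := by
  intro h
  have h0 : pvPat[0] = (PySem.Chars.lower (c :: rest))[0]'(by
      have := h.length_le; simp [PySem.Chars.lower]) :=
    h.getElem (by simp [pvPat])
  have h1 : (PySem.Chars.lower (c :: rest))[0]'(by simp [PySem.Chars.lower]) =
      PySem.Chars.lowerChar c := by simp [PySem.Chars.lower]
  have h2 : PySem.Chars.lowerChar c ∈ pvPat := by
    rw [← h1, ← h0]; exact List.getElem_mem _
  have := pv_lower_mem_pat_nonspace c h2
  rw [hc] at this; exact absurd this (by simp)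

theorem pvRem_cons_space (c : Char) (rest : List Char) (hc : PySem.Chars.isspace c = true) :
    pvRem (c :: rest) = c :: pvRem rest :=
  pvRem_cons_nomatch c rest (pv_no_match_at_space c rest hc)

theorem pvRem_sublist : ∀ n (cs : List Char), cs.length ≤ n → List.Sublist (pvRem cs) cs := by
  intro n
  induction n with
  | zero =>
    intro cs h
    have : cs = [] := List.length_eq_zero_iff.mp (by omega)
    subst this; rw [pvRem_nil]
  | succ n ih =>
    intro cs h
    match cs with
    | [] => rw [pvRem_nil]
    | c :: rest =>
      by_cases hm : pvPat <+: PySem.Chars.lower (c :: rest)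
      · rw [pvRem_cons_match c rest hm]
        have hlen : ((c :: rest).drop 8).length ≤ n := by
          simp only [List.length_drop, List.length_cons] at *
          omega
        exact (ih _ hlen).trans (List.drop_sublist _ _)
      · rw [pvRem_cons_nomatch c rest hm]
        exact (ih rest (by simp at h; omega)).cons₂ c

-- a match cannot reach past the end of xs into a whitespace character
theorem pv_no_match_spanning (xs : List Char) (y : Char) (ys' : List Char)
    (hy : PySem.Chars.isspace y = true) (hlt : xs.length < 8)
    (h : pvPat <+: PySem.Chars.lower (xs ++ y :: ys')) : False := by
  have hlen : xs.length < pvPat.length := by simpa [pvPat] using hlt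
  have hxs : (PySem.Chars.lower (xs ++ y :: ys')).length = xs.length + ys'.length + 1 := by
    simp [PySem.Chars.lower]; omega
  have h0 : pvPat[xs.length]'hlen =
      (PySem.Chars.lower (xs ++ y :: ys'))[xs.length]'(by omega) := h.getElem hlen
  have h1 : (PySem.Chars.lower (xs ++ y :: ys'))[xs.length]'(by omega) =
      PySem.Chars.lowerChar y := by
    simp [PySem.Chars.lower, List.getElem_append_right, List.length_map]
  have h2 : PySem.Chars.lowerChar y ∈ pvPat := by
    rw [← h1, ← h0]; exact List.getElem_mem _
  have := pv_lower_mem_pat_nonspace y h2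
  rw [hy] at this; exact absurd this (by simp)

theorem pvRem_append : ∀ n (xs ys : List Char), xs.length ≤ n →
    (ys = [] ∨ ∃ y ys', ys = y :: ys' ∧ PySem.Chars.isspace y = true) →
    pvRem (xs ++ ys) = pvRem xs ++ pvRem ys := by
  intro n
  induction n with
  | zero =>
    intro xs ys h _
    have : xs = [] := List.length_eq_zero_iff.mp (by omega)
    subst this; rw [pvRem_nil]; simp
  | succ n ih =>
    intro xs ys h hys
    match xs with
    | [] => rw [pvRem_nil]; simp
    | x :: xs' =>
      by_cases hm : pvPat <+: PySem.Chars.lower ((x :: xs') ++ ys)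
      · -- a match at position 0 lies entirely within x :: xs'
        have h8 : 7 ≤ xs'.length := by
          by_contra h8
          rcases hys with rfl | ⟨y, ys', rfl, hy⟩
          · have := hm.length_le
            simp [PySem.Chars.lower, pvPat] at this
            omega
          · exact pv_no_match_spanning (x :: xs') y ys' hy (by simp; omega) hm
        have hmx : pvPat <+: PySem.Chars.lower (x :: xs') := by
          have h1 : PySem.Chars.lower ((x :: xs') ++ ys) =
              PySem.Chars.lower (x :: xs') ++ PySem.Chars.lower ys := by
            simp [PySem.Chars.lower]
          rw [h1] at hm
          have h2 : pvPat = (PySem.Chars.lower (x :: xs') ++ PySem.Chars.lower ys).take 8 := by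
            rw [List.prefix_iff_eq_take.mp hm]; rfl
          rw [List.take_append_of_le_length (by simp [PySem.Chars.lower]; omega)] at h2
          rw [h2]
          exact List.take_prefix _ _
        have hm' : pvPat <+: PySem.Chars.lower (x :: (xs' ++ ys)) := by
          rw [← List.cons_append]; exact hm
        rw [List.cons_append, pvRem_cons_match x (xs' ++ ys) hm']
        rw [pvRem_cons_match x xs' hmx]
        rw [← List.cons_append,
          show ((x :: xs') ++ ys).drop 8 = (x :: xs').drop 8 ++ ys from
            List.drop_append_of_le_length (by simp; omega)]
        exact ih _ ys (by simp at h ⊢; omega) hys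
      · have hmx : ¬ pvPat <+: PySem.Chars.lower (x :: xs') := by
          intro hpre
          exact hm (by
            have : PySem.Chars.lower ((x :: xs') ++ ys) =
                PySem.Chars.lower (x :: xs') ++ PySem.Chars.lower ys := by
              simp [PySem.Chars.lower]
            rw [this]
            exact hpre.trans (List.prefix_append _ _))
        have hm' : ¬ pvPat <+: PySem.Chars.lower (x :: (xs' ++ ys)) := by
          rw [← List.cons_append]; exact hm
        rw [List.cons_append, pvRem_cons_nomatch x (xs' ++ ys) hm']
        rw [pvRem_cons_nomatch x xs' hmx]
        rw [ih xs' ys (by simp at h; omega) hys]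
        simp

theorem pvRem_match (cs : List Char) (h : pvPat <+: PySem.Chars.lower cs) :
    pvRem cs = pvRem (cs.drop 8) := by
  match cs with
  | [] => have := h.length_le; simp [pvPat, PySem.Chars.lower] at this
  | c :: rest => exact pvRem_cons_match c rest h

theorem pvRem_no_infix : ∀ n (cs : List Char), cs.length ≤ n →
    ¬ pvPat <:+: PySem.Chars.lower cs → pvRem cs = cs := by
  intro n
  induction n with
  | zero =>
    intro cs h _
    have : cs = [] := List.length_eq_zero_iff.mp (by omega)
    subst this; exact pvRem_nil
  | succ n ih =>
    intro cs h hni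
    match cs with
    | [] => exact pvRem_nil
    | c :: rest =>
      have h0 : ¬ pvPat <+: PySem.Chars.lower (c :: rest) := fun hp => hni hp.isInfix
      rw [pvRem_cons_nomatch c rest h0]
      rw [ih rest (by simp at h; omega) (fun hi => hni (by
        have : PySem.Chars.lower (c :: rest) =
            PySem.Chars.lowerChar c :: PySem.Chars.lower rest := rfl
        rw [this]
        exact hi.trans (List.suffix_cons _ _).isInfix))]

theorem pvRem_take_drop : ∀ (k : Nat) (cs : List Char), k ≤ cs.length →
    (∀ i < k, ¬ pvPat <+: (PySem.Chars.lower cs).drop i) →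
    pvRem cs = cs.take k ++ pvRem (cs.drop k) := by
  intro k
  induction k with
  | zero => intro cs _ _; simp
  | succ k ih =>
    intro cs hk hno
    match cs with
    | [] => simp at hk
    | c :: rest =>
      have h0 : ¬ pvPat <+: PySem.Chars.lower (c :: rest) := by
        have := hno 0 (by omega); simpa using this
      rw [pvRem_cons_nomatch c rest h0]
      rw [ih rest (by simp at hk; omega) (fun i hi => by
        have := hno (i + 1) (by omega)
        have heq : (PySem.Chars.lower (c :: rest)).drop (i + 1) =
            (PySem.Chars.lower rest).drop i := by
          simp [PySem.Chars.lower]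
        rw [heq] at this
        exact this)]
      simp

theorem pvBStrip_eq_pvRem : ∀ n (tok : List Char), tok.length ≤ n →
    pvBStrip tok = pvRem tok := by
  intro n
  induction n with
  | zero =>
    intro tok h
    have : tok = [] := List.length_eq_zero_iff.mp (by omega)
    subst this
    rw [pvBStrip, pvRem_nil]
    rw [dif_pos (by rfl)]
  | succ n ih =>
    intro tok h
    rw [pvBStrip]
    by_cases hf : PySem.Chars.find (PySem.Chars.lower tok) pvPat = -1
    · rw [dif_pos hf]
      exact (pvRem_no_infix (n+1) tok h
        ((PySem.Chars.find_eq_neg_one_iff _ _).mp hf)).symm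
    · rw [dif_neg hf]
      have h0 := PySem.Chars.neg_one_le_find (PySem.Chars.lower tok) pvPat
      have h1 : (0:Int) ≤ PySem.Chars.find (PySem.Chars.lower tok) pvPat := by omega
      obtain ⟨hpre, hmin⟩ := PySem.Chars.find_spec h1
      set j := (PySem.Chars.find (PySem.Chars.lower tok) pvPat).toNat with hj
      have hjle : j ≤ tok.length := by
        have := PySem.Chars.find_le_length (PySem.Chars.lower tok) pvPat
        have hlen : (PySem.Chars.lower tok).length = tok.length := by
          simp [PySem.Chars.lower]
        rw [hlen] at this
        omega
      have hplen := hpre.length_le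
      have h8 : j + 8 ≤ tok.length := by
        have hlen : ((PySem.Chars.lower tok).drop j).length = tok.length - j := by
          simp [PySem.Chars.lower]
        have hp8 : pvPat.length = 8 := rfl
        rw [hlen, hp8] at hplen
        omega
      have hstep1 : pvRem tok = tok.take j ++ pvRem (tok.drop j) := by
        apply pvRem_take_drop j tok hjle
        intro i hi
        exact hmin i hi
      have hstep2 : pvRem (tok.drop j) = pvRem (tok.drop (j + 8)) := by
        rw [pvRem_match (tok.drop j) (by
          have : PySem.Chars.lower (tok.drop j) = (PySem.Chars.lower tok).drop j := by
            simp [PySem.Chars.lower, List.map_drop]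
          rw [this]; exact hpre)]
        rw [List.drop_drop]
      rw [hstep1, hstep2, ih (tok.drop (j + 8)) (by simp; omega)]

theorem pv_go_acc : ∀ (s cur : List Char) (acc : List (List Char)),
    PySem.Chars.split₀.go s cur acc = acc.reverse ++ PySem.Chars.split₀.go s cur [] := by
  intro s
  induction s with
  | nil =>
    intro cur acc
    rw [PySem.Chars.split₀.go, PySem.Chars.split₀.go]
    by_cases hc : cur.isEmpty
    · simp [hc]
    · simp [hc]
  | cons c rest ih =>
    intro cur acc
    rw [PySem.Chars.split₀.go, PySem.Chars.split₀.go]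
    by_cases hs : PySem.Chars.isspace c
    · by_cases hc : cur.isEmpty
      · simp only [hs, hc, if_true]
        exact ih [] acc
      · simp only [hs, hc, if_true, Bool.false_eq_true, if_false]
        rw [ih [] (cur.reverse :: acc), ih [] [cur.reverse]]
        simp
    · simp only [hs, Bool.false_eq_true, if_false]
      exact ih (c :: cur) acc

theorem pv_split_nil : PySem.Chars.split₀ [] = [] := by
  rw [PySem.Chars.split₀, PySem.Chars.split₀.go]; rfl

theorem pv_split_space (c : Char) (rest : List Char) (hc : PySem.Chars.isspace c = true) :
    PySem.Chars.split₀ (c :: rest) = PySem.Chars.split₀ rest := by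
  rw [PySem.Chars.split₀, PySem.Chars.split₀.go]
  simp [hc, PySem.Chars.split₀]

theorem pv_go_word : ∀ (s cur : List Char), cur ≠ [] →
    PySem.Chars.split₀.go s cur [] =
      (cur.reverse ++ s.takeWhile (fun d => !PySem.Chars.isspace d)) ::
        PySem.Chars.split₀ (s.dropWhile (fun d => !PySem.Chars.isspace d)) := by
  intro s
  induction s with
  | nil =>
    intro cur hcur
    rw [PySem.Chars.split₀.go]
    simp [List.isEmpty_iff, hcur, PySem.Chars.split₀, PySem.Chars.split₀.go]
  | cons c rest ih =>
    intro cur hcur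
    rw [PySem.Chars.split₀.go]
    by_cases hs : PySem.Chars.isspace c
    · rw [if_pos hs, if_neg (by simpa [List.isEmpty_iff] using hcur)]
      rw [pv_go_acc]
      simp only [List.takeWhile_cons, List.dropWhile_cons, hs, Bool.not_true,
        Bool.false_eq_true, if_false]
      rw [pv_split_space c rest hs, PySem.Chars.split₀]
      simp
    · simp only [hs, Bool.false_eq_true, if_false]
      rw [ih (c :: cur) (by simp)]
      simp only [List.takeWhile_cons, List.dropWhile_cons, hs]
      simp

theorem pv_split_word (c : Char) (rest : List Char) (hc : PySem.Chars.isspace c = false) :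
    PySem.Chars.split₀ (c :: rest) =
      (c :: rest.takeWhile (fun d => !PySem.Chars.isspace d)) ::
        PySem.Chars.split₀ (rest.dropWhile (fun d => !PySem.Chars.isspace d)) := by
  rw [PySem.Chars.split₀, PySem.Chars.split₀.go]
  simp only [hc, Bool.false_eq_true, if_false]
  rw [pv_go_word rest [c] (by simp)]
  simp

theorem pv_split_tokens : ∀ n (cs : List Char), cs.length ≤ n →
    ∀ w ∈ PySem.Chars.split₀ cs, w ≠ [] ∧ ∀ c ∈ w, PySem.Chars.isspace c = false := by
  intro n
  induction n with
  | zero =>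
    intro cs h
    have : cs = [] := List.length_eq_zero_iff.mp (by omega)
    subst this; rw [pv_split_nil]; simp
  | succ n ih =>
    intro cs h w hw
    match cs with
    | [] => rw [pv_split_nil] at hw; simp at hw
    | c :: rest =>
      by_cases hs : PySem.Chars.isspace c
      · rw [pv_split_space c rest hs] at hw
        exact ih rest (by simp at h; omega) w hw
      · rw [pv_split_word c rest (by simpa using hs)] at hw
        rcases List.mem_cons.mp hw with rfl | hw'
        · constructor
          · simp
          · intro d hd
            rcases List.mem_cons.mp hd with rfl | hd'
            · simpa using hs
            · have := List.mem_takeWhile_imp hd'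
              simpa using this
        · have hlen : (rest.dropWhile (fun d => !PySem.Chars.isspace d)).length ≤ n := by
            have := List.length_dropWhile_le (fun d => !PySem.Chars.isspace d) rest
            simp at h; omega
          exact ih _ hlen w hw'

theorem pv_split_append_word (w z : List Char)
    (hw : ∀ c ∈ w, PySem.Chars.isspace c = false)
    (hz : z = [] ∨ ∃ y ys', z = y :: ys' ∧ PySem.Chars.isspace y = true) :
    PySem.Chars.split₀ (w ++ z) =
      (if w.isEmpty then [] else [w]) ++ PySem.Chars.split₀ z := by
  match w with
  | [] => simp
  | c :: w' =>
    have hc : PySem.Chars.isspace c = false := hw c (by simp)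
    rw [List.cons_append, pv_split_word c (w' ++ z) hc]
    have htw : (w' ++ z).takeWhile (fun d => !PySem.Chars.isspace d) = w' := by
      rw [List.takeWhile_append]
      have hw' : w'.takeWhile (fun d => !PySem.Chars.isspace d) = w' := by
        apply List.takeWhile_eq_self_iff.mpr
        intro x hx; simp [hw x (by simp [hx])]
      rw [if_pos (by rw [hw'])]
      have hzt : z.takeWhile (fun d => !PySem.Chars.isspace d) = [] := by
        rcases hz with rfl | ⟨y, ys', rfl, hy⟩
        · rfl
        · simp [hy]
      rw [hzt]; simp
    have hdw : (w' ++ z).dropWhile (fun d => !PySem.Chars.isspace d) = z := by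
      rw [List.dropWhile_append]
      have hw' : w'.dropWhile (fun d => !PySem.Chars.isspace d) = [] := by
        apply List.dropWhile_eq_nil_iff.mpr
        intro x hx; simp [hw x (by simp [hx])]
      rw [hw']
      simp only [List.isEmpty_nil, if_true]
      rcases hz with rfl | ⟨y, ys', rfl, hy⟩
      · rfl
      · simp [hy]
    rw [htw, hdw]
    simp

theorem pv_split_rem : ∀ n (cs : List Char), cs.length ≤ n →
    PySem.Chars.split₀ (pvRem cs) =
      ((PySem.Chars.split₀ cs).map pvRem).filter (fun w => !w.isEmpty) := by
  intro n
  induction n with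
  | zero =>
    intro cs h
    have : cs = [] := List.length_eq_zero_iff.mp (by omega)
    subst this; rw [pvRem_nil, pv_split_nil]; simp
  | succ n ih =>
    intro cs h
    match cs with
    | [] => rw [pvRem_nil, pv_split_nil]; simp
    | c :: rest =>
      simp only [List.length_cons] at h
      by_cases hs : PySem.Chars.isspace c
      · rw [pvRem_cons_space c rest hs, pv_split_space c (pvRem rest) hs,
          pv_split_space c rest hs]
        exact ih rest (by omega)
      · -- word case
        have hs' : PySem.Chars.isspace c = false := by simpa using hs
        set P : Char → Bool := fun d => !PySem.Chars.isspace d with hP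
        set w : List Char := c :: rest.takeWhile P with hw
        set r : List Char := rest.dropWhile P with hr
        have hsplit : PySem.Chars.split₀ (c :: rest) = w :: PySem.Chars.split₀ r :=
          pv_split_word c rest hs'
        have hwr : w ++ r = c :: rest := by
          rw [hw, hr, List.cons_append, List.takeWhile_append_dropWhile]
        have hwns : ∀ d ∈ w, PySem.Chars.isspace d = false := by
          intro d hd
          rcases List.mem_cons.mp hd with rfl | hd'
          · exact hs'
          · have := List.mem_takeWhile_imp hd'
            rw [hP] at this; simpa using this
        have hrform : r = [] ∨ ∃ y ys', r = y :: ys' ∧ PySem.Chars.isspace y = true := by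
          match hre : r with
          | [] => exact Or.inl rfl
          | y :: ys' =>
            refine Or.inr ⟨y, ys', rfl, ?_⟩
            have h2 := List.head?_dropWhile_not P rest
            have hd : rest.dropWhile P = y :: ys' := by rw [← hr]
            rw [hd] at h2
            simp only [List.head?_cons] at h2
            rw [hP] at h2; simpa using h2
        have hrem : pvRem (c :: rest) = pvRem w ++ pvRem r := by
          rw [← hwr]; exact pvRem_append w.length w r le_rfl hrform
        have hremw_ns : ∀ d ∈ pvRem w, PySem.Chars.isspace d = false := by
          intro d hd
          exact hwns d ((pvRem_sublist w.length w le_rfl).mem hd)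
        have hremr : pvRem r = [] ∨
            ∃ y ys', pvRem r = y :: ys' ∧ PySem.Chars.isspace y = true := by
          rcases hrform with hre | ⟨y, ys', hre, hy⟩
          · rw [hre, pvRem_nil]; exact Or.inl rfl
          · rw [hre, pvRem_cons_space y ys' hy]
            exact Or.inr ⟨y, pvRem ys', rfl, hy⟩
        have hrlen : r.length ≤ n := by
          have := List.length_dropWhile_le P rest
          rw [hr]; omega
        rw [hrem, pv_split_append_word (pvRem w) (pvRem r) hremw_ns hremr, ih r hrlen,
          hsplit]
        simp only [List.map_cons, List.filter_cons]
        by_cases he : (pvRem w).isEmpty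
        · simp [he]
        · simp [he]

theorem pv_rstrip_append (x z : List Char) (h : PySem.Chars.rstrip z ≠ []) :
    PySem.Chars.rstrip (x ++ z) = x ++ PySem.Chars.rstrip z := by
  unfold PySem.Chars.rstrip at *
  rw [List.reverse_append, List.dropWhile_append]
  have hne : ¬ (List.dropWhile PySem.Chars.isspace z.reverse).isEmpty = true := by
    intro hemp
    rw [List.isEmpty_iff] at hemp
    rw [hemp] at h
    simp at h
  rw [if_neg hne]
  simp

-- a nonempty whitespace-free-token join starts with a non-space character
theorem pv_join_shape (w : List Char) (L' : List (List Char)) :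
    ∃ t, PySem.Chars.join " ".toList (w :: L') = w ++ t := by
  match L' with
  | [] => exact ⟨[], by rw [PySem.Chars.join_singleton]; simp⟩
  | q :: rest =>
    refine ⟨" ".toList ++ PySem.Chars.join " ".toList (q :: rest), ?_⟩
    rw [PySem.Chars.join_cons_cons]
    simp

theorem pv_rstrip_join (L : List (List Char))
    (h : ∀ w ∈ L, w ≠ [] ∧ ∀ c ∈ w, PySem.Chars.isspace c = false) :
    PySem.Chars.rstrip (PySem.Chars.join " ".toList L) = PySem.Chars.join " ".toList L := by
  induction L with
  | nil => rw [PySem.Chars.join_nil]; rfl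
  | cons w L' ih =>
    obtain ⟨hwne, hwns⟩ := h w (by simp)
    match L' with
    | [] =>
      rw [PySem.Chars.join_singleton]
      unfold PySem.Chars.rstrip
      match hrev : w.reverse with
      | [] => simp at hrev; exact absurd hrev hwne
      | d :: t =>
        have hd : PySem.Chars.isspace d = false := by
          apply hwns
          have : d ∈ w.reverse := by rw [hrev]; simp
          simpa using this
        rw [List.dropWhile_cons, hd]
        simp [← hrev]
    | q :: rest =>
      have hih : PySem.Chars.rstrip (PySem.Chars.join " ".toList (q :: rest)) =
          PySem.Chars.join " ".toList (q :: rest) :=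
        ih (fun u hu => h u (by simp [hu]))
      have hqne : q ≠ [] := (h q (by simp)).1
      obtain ⟨t, ht⟩ := pv_join_shape q rest
      have hzne : PySem.Chars.rstrip (PySem.Chars.join " ".toList (q :: rest)) ≠ [] := by
        rw [hih, ht]
        intro hemp
        exact hqne (List.append_eq_nil_iff.mp hemp).1
      rw [PySem.Chars.join_cons_cons]
      rw [List.append_assoc]
      rw [pv_rstrip_append w (" ".toList ++ PySem.Chars.join " ".toList (q :: rest)) (by
        rw [show (" ".toList ++ PySem.Chars.join " ".toList (q :: rest)) =
            [' '] ++ PySem.Chars.join " ".toList (q :: rest) from rfl]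
        rw [pv_rstrip_append [' '] _ hzne, hih]
        intro hemp
        simp at hemp)]
      rw [show (" ".toList ++ PySem.Chars.join " ".toList (q :: rest)) =
          [' '] ++ PySem.Chars.join " ".toList (q :: rest) from rfl]
      rw [pv_rstrip_append [' '] _ hzne, hih]

theorem pv_strip_join (L : List (List Char))
    (h : ∀ w ∈ L, w ≠ [] ∧ ∀ c ∈ w, PySem.Chars.isspace c = false) :
    PySem.Chars.strip (PySem.Chars.join " ".toList L) = PySem.Chars.join " ".toList L := by
  have hl : PySem.Chars.lstrip (PySem.Chars.join " ".toList L) =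
      PySem.Chars.join " ".toList L := by
    match L with
    | [] => rw [PySem.Chars.join_nil]; rfl
    | w :: L' =>
      obtain ⟨hwne, hwns⟩ := h w (by simp)
      obtain ⟨t, ht⟩ := pv_join_shape w L'
      rw [ht]
      match hwe : w with
      | c :: w' =>
        unfold PySem.Chars.lstrip
        rw [List.cons_append, List.dropWhile_cons, hwns c (by simp)]
        simp
  unfold PySem.Chars.strip
  rw [hl, pv_rstrip_join L h]

-- ===== VERDICT (by name: the statement is the Claim_ definition above) =====
theorem normalise_model_label_spec : Claim_equal_normalise_model_label := by
  intro filename _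
  unfold Spec_normalise_model_label normalise_model_label normalise_model_label_alt
  dsimp only []
  set n := (if PySem.Chars.endswith (PySem.Chars.lower filename.toList) ".h".toList
            then filename.toList.take (filename.toList.length - 2) else filename.toList)
    with hn
  have h1 : pvAScan n (PySem.Chars.lower n) = pvRem n := rfl
  rw [h1]
  rw [pv_strip_join (PySem.Chars.split₀ (pvRem n))
    (pv_split_tokens (pvRem n).length (pvRem n) le_rfl)]
  rw [pv_split_rem n.length n le_rfl]
  have h2 : (PySem.Chars.split₀ n).map pvBStrip = (PySem.Chars.split₀ n).map pvRem :=
    List.map_congr_left (fun w _ => pvBStrip_eq_pvRem w.length w le_rfl)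
  rw [h2]
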